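-- pv_equiv track=rewrite | github.com/Edward1304/Programming-Fundamentals-simple-programs-for-introduction-to-programming- | Registro de datos.py | EJP01T03
-- ===== SOURCE A (Python) =====
-- def EJP01T03(E):
--     E = abs(E)
--     CD = 0
--     PD = 1
--     if E == 0:
--         CD = 1
--         PD = 0
--     SD = 0
--     UD = 1
--     while E > 0:
--         UD = E % 10
--         CD = CD + 1
--         SD = SD + UD
--         PD = PD * UD
--         E = E // 10
--     return CD, SD, PD
-- ===== SOURCE B (Python) =====
-- def _digits(n):
--     # least-significant-first digit list of n >= 0 (empty for 0)
--     if n == 0: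
--         return []
--     return [n % 10] + _digits(n // 10)
--
--
-- def _prod(ds):
--     if not ds:
--         return 1
--     return ds[0] * _prod(ds[1:])
--
--
-- def EJP01T03(E):
--     ds = _digits(abs(E)) or [0]
--     return len(ds), sum(ds), _prod(ds)
-- ===== Notes on version B (the rewrite author's own statement) =====
-- stated objective: alternative
-- what changed: B materialises the digit list of |E| once (recursively, empty list for 0 replaced by [0]) and derives count, sum and product as three separate passes (len, sum, recursive product), instead of A's single fused while-loop with three accumulators and a special-cased zero branch.
import Mathlib
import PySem

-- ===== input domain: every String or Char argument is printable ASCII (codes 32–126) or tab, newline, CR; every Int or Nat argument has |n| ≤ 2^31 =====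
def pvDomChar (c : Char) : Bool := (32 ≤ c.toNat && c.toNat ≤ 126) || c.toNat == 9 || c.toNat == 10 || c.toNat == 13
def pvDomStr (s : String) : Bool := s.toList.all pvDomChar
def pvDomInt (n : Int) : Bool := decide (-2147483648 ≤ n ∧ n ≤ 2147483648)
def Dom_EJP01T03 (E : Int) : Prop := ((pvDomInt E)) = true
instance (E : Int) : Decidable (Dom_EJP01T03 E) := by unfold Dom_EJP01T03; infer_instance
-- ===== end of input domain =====

-- B builds the digit list of |E| once and computes count/sum/product as three separate passes,
-- instead of A's fused three-accumulator while-loop; an alternative decomposition, same cost.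


-- ===== PORT A =====
-- the while-loop of A, state (E, CD, SD, PD); terminates because E.toNat strictly decreases
def EJP01T03.loop (E CD SD PD : Int) : Int × Int × Int :=
  if E > 0 then
    let UD := PySem.Int.mod E 10
    EJP01T03.loop (PySem.Int.floordiv E 10) (CD + 1) (SD + UD) (PD * UD)
  else (CD, SD, PD)
termination_by E.toNat
decreasing_by
  simp only [PySem.Int.floordiv]
  rw [Int.fdiv_eq_ediv_of_nonneg E (by norm_num : (0:Int) ≤ 10)]
  omega

def EJP01T03 (E : Int) : Int × Int × Int :=
  let E := |E|
  let CD : Int := if E = 0 then 1 else 0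
  let PD : Int := if E = 0 then 0 else 1
  EJP01T03.loop E CD 0 PD

-- ===== PORT B =====
-- _digits(n): least-significant-first digit list of n ≥ 0 (empty for 0)
def pvDigits (n : Nat) : List Int :=
  if n = 0 then []
  else (↑(n % 10) : Int) :: pvDigits (n / 10)
decreasing_by exact Nat.div_lt_self (by omega) (by norm_num)

-- _prod(ds): recursive product
def pvProd : List Int → Int
  | [] => 1
  | d :: ds => d * pvProd ds

def EJP01T03_alt (E : Int) : Int × Int × Int :=
  let ds0 := pvDigits E.natAbs
  let ds := if ds0 = [] then [(0 : Int)] else ds0   -- `_digits(abs(E)) or [0]`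
  ((ds.length : Int), ds.sum, pvProd ds)

-- ===== PRECONDITION & SPEC =====
def Spec_EJP01T03 (E : Int) (out : Int × Int × Int) : Prop := out = EJP01T03_alt E
instance (E : Int) (out : Int × Int × Int) : Decidable (Spec_EJP01T03 E out) := by unfold Spec_EJP01T03; infer_instance

-- ===== CLAIM (what is proved, stated in full; the proofs are below) =====
def Claim_equal_EJP01T03 : Prop := ∀ (E : Int), Dom_EJP01T03 E → Spec_EJP01T03 E (EJP01T03 E)

-- ===== LEMMAS AND PROOFS =====

theorem pvDigits_zero : pvDigits 0 = [] := by
  unfold pvDigits; simp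

theorem pvDigits_pos {n : Nat} (h : n ≠ 0) :
    pvDigits n = (↑(n % 10) : Int) :: pvDigits (n / 10) := by
  conv_lhs => unfold pvDigits
  simp [h]

-- A's loop, run on a natural number, computes exactly B's three list statistics.
theorem loop_eq_stats : ∀ (n : Nat) (CD SD PD : Int),
    EJP01T03.loop (↑n) CD SD PD =
      (CD + ((pvDigits n).length : Int), SD + (pvDigits n).sum, PD * pvProd (pvDigits n)) := by
  intro n
  induction n using Nat.strong_induction_on with
  | _ n ih =>
    intro CD SD PD
    by_cases h : n = 0
    · subst h
      rw [EJP01T03.loop.eq_def]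
      simp [pvDigits_zero, pvProd]
    · have hpos : (↑n : Int) > 0 := by exact_mod_cast Nat.pos_of_ne_zero h
      rw [EJP01T03.loop.eq_def]
      simp only [hpos, if_true, PySem.Int.mod, PySem.Int.floordiv]
      rw [show ((n:Int).fdiv 10) = ((n / 10 : Nat) : Int) from (Int.ofNat_fdiv n 10).symm,
          show ((n:Int).fmod 10) = ((n % 10 : Nat) : Int) from (Int.ofNat_fmod n 10).symm]
      rw [ih (n / 10) (Nat.div_lt_self (Nat.pos_of_ne_zero h) (by norm_num))]
      rw [pvDigits_pos h]
      simp [pvProd, List.sum_cons]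
      constructor
      · ring
      constructor
      · ring
      · ring

-- ===== VERDICT (by name: the statement is the Claim_ definition above) =====
theorem EJP01T03_spec : Claim_equal_EJP01T03 := by
  intro E _
  unfold Spec_EJP01T03 EJP01T03 EJP01T03_alt
  have habs : |E| = (↑E.natAbs : Int) := (Int.abs_eq_natAbs E)
  by_cases h : E.natAbs = 0
  · simp only [habs, h]
    rw [loop_eq_stats]
    simp [pvDigits_zero, pvProd]
  · have hne : |E| ≠ 0 := by rw [habs]; exact_mod_cast h
    simp only [habs, loop_eq_stats]
    have hds : pvDigits E.natAbs ≠ [] := by rw [pvDigits_pos h]; simp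
    have hE : E ≠ 0 := by omega
    simp [hds, hE]
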